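-- pv_equiv track=rewrite | github.com/coleman-zachery/zero_sum | main.py | board_symmetries
-- ===== SOURCE A (Python) =====
-- def board_to_string(board):
--     return ''.join([''.join(row) for row in board])
--
-- def string_to_board(board_string, rows=3, cols=3):
--     return [list(board_string[i*cols:(1+i)*cols]) for i in range(rows)]
--
-- def copy_board(board):
--     return string_to_board(board_to_string(board), len(board), len(board[0]))
--
-- def flip_board(board, vertically=True): # flips board vertically or horizontally
--     if vertically: return board[::-1]
--     return [row[::-1] for row in board] # horizontal flip
--
-- def diagonal_board(board): # flips board along the diagonal (should only be performed on square boards)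
--     return list(zip(*board))
--
-- def rotate_board(board): # (should only be performed on square boards)
--     return diagonal_board(flip_board(board))
--
-- def board_symmetries(board, gravity=False):
--     board_copy = copy_board(board)
--     symmetries = set([board_to_string(board_copy)])
--     if gravity:
--         board_copy = flip_board(board_copy, vertically=False)
--         symmetries.add(board_to_string(board_copy))
--     elif len(board) == len(board[0]):
--         r, d = rotate_board, diagonal_board
--         for z in [r, r, r, d, r, r, r]:
--             board_copy = z(board_copy)
--             symmetries.add(board_to_string(board_copy))
--     else:
--         for flip in [True, False, True]:
--             board_copy = flip_board(board_copy, vertically=flip)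
--             symmetries.add(board_to_string(board_copy))
--     return symmetries
-- ===== SOURCE B (Python) =====
-- # B: direct enumeration of the symmetry-group elements (no stateful cumulative
-- # chain, no set mutation): normalize the board once, list the transformed
-- # boards per branch, and collect their strings with a set comprehension.
--
-- def board_to_string(board):
--     return ''.join([''.join(row) for row in board])
--
-- def string_to_board(board_string, rows=3, cols=3):
--     return [list(board_string[i*cols:(1+i)*cols]) for i in range(rows)]
--
-- def vflip(board):
--     return board[::-1]
--
-- def hflip(board):
--     return [row[::-1] for row in board]
--
-- def diag(board):
--     return [list(t) for t in zip(*board)]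
--
-- def rot(board):
--     return diag(vflip(board))
--
-- def board_symmetries(board, gravity=False):
--     base = string_to_board(board_to_string(board), len(board), len(board[0]))
--     if gravity:
--         boards = [base, hflip(base)]
--     elif len(board) == len(board[0]):
--         db = diag(base)
--         boards = [base, rot(base), rot(rot(base)), rot(rot(rot(base))),
--                   rot(db), rot(rot(db)), rot(rot(rot(db))), db]
--     else:
--         boards = [base, vflip(base), hflip(vflip(base)), hflip(base)]
--     return {board_to_string(b) for b in boards}
-- ===== Notes on version B (the rewrite author's own statement) =====
-- stated objective: alternative
-- what changed: A threads one mutable board through a cumulative chain of transforms ([r,r,r,d,r,r,r] / a flip loop) while mutating a set; B enumerates the group elements directly (the rotations of the normalized base board and of its diagonal reflection, resp. the four flip combinations) and collects their strings with a set comprehension.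
import Mathlib
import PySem

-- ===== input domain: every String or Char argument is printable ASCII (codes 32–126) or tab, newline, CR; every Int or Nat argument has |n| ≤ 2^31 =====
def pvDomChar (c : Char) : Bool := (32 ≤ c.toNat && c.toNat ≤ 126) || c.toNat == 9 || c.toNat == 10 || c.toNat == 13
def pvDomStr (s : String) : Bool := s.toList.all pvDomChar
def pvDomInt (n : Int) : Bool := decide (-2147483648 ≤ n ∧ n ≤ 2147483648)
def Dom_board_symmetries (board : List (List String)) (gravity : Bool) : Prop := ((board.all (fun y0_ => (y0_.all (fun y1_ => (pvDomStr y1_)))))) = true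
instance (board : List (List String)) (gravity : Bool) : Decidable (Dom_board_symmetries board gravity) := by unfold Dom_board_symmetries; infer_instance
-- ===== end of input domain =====

-- B replaces A's stateful cumulative transform chain with a direct enumeration of the
-- group elements collected by a set comprehension (objective: alternative decomposition, not faster).

-- ===== PORT A =====
-- shared module helpers (both Python versions use the same helper code)

-- board_to_string: ''.join([''.join(row) for row in board])
def pv_b2s (board : List (List String)) : String :=
  PySem.Str.join "" (board.map (fun row => PySem.Str.join "" row))

-- string_to_board: [list(board_string[i*cols:(1+i)*cols]) for i in range(rows)]
-- (list(str_slice) is the list of its characters as 1-char strings)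
def pv_s2b (s : String) (rows cols : Int) : List (List String) :=
  (PySem.List.pyRange 0 rows 1).map (fun i =>
    (PySem.List.slice s.toList (some (i*cols)) (some ((1+i)*cols))).map
      (fun c => String.ofList [c]))

-- copy_board: string_to_board(board_to_string(board), len(board), len(board[0]))
-- board[0] raises IndexError on [] (excluded by Pre_); pyGetD board 0 [] = board[0] there
def pv_copy (board : List (List String)) : List (List String) :=
  pv_s2b (pv_b2s board) (board.length : Int) ((PySem.List.pyGetD board 0 []).length : Int)

-- flip_board: board[::-1] (vertically) or [row[::-1] for row in board];
-- [::-1] is reverse (PySem.List.slice?_none_none_neg_one)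
def pv_flip (board : List (List String)) (vertically : Bool) : List (List String) :=
  if vertically then board.reverse else board.map List.reverse

-- minimum row length: zip(*board) truncates to the shortest row (0 if board is empty)
def pvMinLen (board : List (List String)) : Nat :=
  ((board.map List.length).min?).getD 0

-- diagonal_board: list(zip(*board)) — exact: zip yields pvMinLen tuples, the j-th
-- holding row[j] of every row in order
def pv_diag (board : List (List String)) : List (List String) :=
  (List.range (pvMinLen board)).map (fun j => board.map (fun row => row.getD j ""))

-- rotate_board: diagonal_board(flip_board(board))
def pv_rot (board : List (List String)) : List (List String) :=
  pv_diag (pv_flip board true)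

def board_symmetries (board : List (List String)) (gravity : Bool) : List String :=
  let board_copy := pv_copy board
  let symmetries : PySem.Set String := PySem.Set.ofList [pv_b2s board_copy]
  if gravity then
    let board_copy := pv_flip board_copy false
    PySem.Set.add symmetries (pv_b2s board_copy)
  else if (board.length : Int) = ((PySem.List.pyGetD board 0 []).length : Int) then
    (([pv_rot, pv_rot, pv_rot, pv_diag, pv_rot, pv_rot, pv_rot] :
        List (List (List String) → List (List String))).foldl
      (fun st z =>
        let bc := z st.1
        (bc, PySem.Set.add st.2 (pv_b2s bc)))
      (board_copy, symmetries)).2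
  else
    (([true, false, true] : List Bool).foldl
      (fun st f =>
        let bc := pv_flip st.1 f
        (bc, PySem.Set.add st.2 (pv_b2s bc)))
      (board_copy, symmetries)).2

-- ===== PORT B =====
-- Source B defines the same module helpers (board_to_string, string_to_board, vflip,
-- hflip, diag, rot); its vflip/hflip/diag/rot are pv_flip · true / pv_flip · false /
-- pv_diag / pv_rot above.
def board_symmetries_alt (board : List (List String)) (gravity : Bool) : List String :=
  let base := pv_s2b (pv_b2s board) (board.length : Int)
               ((PySem.List.pyGetD board 0 []).length : Int)
  let boards :=
    if gravity then
      [base, pv_flip base false]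
    else if (board.length : Int) = ((PySem.List.pyGetD board 0 []).length : Int) then
      let db := pv_diag base
      [base, pv_rot base, pv_rot (pv_rot base), pv_rot (pv_rot (pv_rot base)),
       pv_rot db, pv_rot (pv_rot db), pv_rot (pv_rot (pv_rot db)), db]
    else
      [base, pv_flip base true, pv_flip (pv_flip base true) false, pv_flip base false]
  PySem.Set.ofList (boards.map pv_b2s)

-- ===== PRECONDITION & SPEC =====
-- A evaluates board[0] and raises IndexError on the empty board; excluded.
def Pre_board_symmetries (board : List (List String)) (gravity : Bool) : Prop :=
  board ≠ []
instance (board : List (List String)) (gravity : Bool) : Decidable (Pre_board_symmetries board gravity) := by unfold Pre_board_symmetries; infer_instance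
def pvWitness_board_symmetries : List (List String) × Bool := ([[ "x" ]], false)

def Spec_board_symmetries (board : List (List String)) (gravity : Bool) (out : List String) : Prop := out = board_symmetries_alt board gravity
instance (board : List (List String)) (gravity : Bool) (out : List String) : Decidable (Spec_board_symmetries board gravity out) := by unfold Spec_board_symmetries; infer_instance

-- ===== CLAIM =====
def Claim_equal_board_symmetries : Prop := ∀ (board : List (List String)) (gravity : Bool), Dom_board_symmetries board gravity → Pre_board_symmetries board gravity → Spec_board_symmetries board gravity (board_symmetries board gravity)

-- ===== LEMMAS AND PROOFS =====

-- index-formula grids: every board reached after one pv_diag is such a grid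
def pvGrid (p q : Nat) (F : Nat → Nat → String) : List (List String) :=
  (List.range p).map (fun j => (List.range q).map (F j))

theorem pvGrid_congr {p q : Nat} {F G : Nat → Nat → String}
    (h : ∀ j < p, ∀ i < q, F j i = G j i) : pvGrid p q F = pvGrid p q G := by
  unfold pvGrid
  apply List.map_congr_left
  intro j hj
  apply List.map_congr_left
  intro i hi
  exact h j (List.mem_range.mp hj) i (List.mem_range.mp hi)

theorem pv_getD_grid {p q : Nat} {F : Nat → Nat → String} {j i : Nat}
    (hj : j < p) (hi : i < q) :
    ((pvGrid p q F).getD j []).getD i "" = F j i := by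
  simp [pvGrid, List.getD, hj, hi]

theorem pv_map_eq_map_range {β : Type} (c : List (List String)) (f : List String → β) :
    c.map f = (List.range c.length).map (fun i => f (c.getD i [])) := by
  apply List.ext_getElem (by simp)
  intro n h1 h2
  simp only [List.length_map] at h1
  simp [List.getD, h1]

theorem pv_diag_eq_grid (c : List (List String)) :
    pv_diag c = pvGrid (pvMinLen c) c.length (fun j i => (c.getD i []).getD j "") := by
  unfold pv_diag pvGrid
  apply List.map_congr_left
  intro j _
  simpa using pv_map_eq_map_range c (fun row => row.getD j "")

theorem pv_reverse_map_range {α : Type} (n : Nat) (f : Nat → α) :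
    ((List.range n).map f).reverse = (List.range n).map (fun i => f (n-1-i)) := by
  apply List.ext_getElem (by simp)
  intro i h1 h2
  simp [List.getElem_reverse, List.getElem_map, List.getElem_range]

theorem pv_vflip_grid (p q : Nat) (F : Nat → Nat → String) :
    pv_flip (pvGrid p q F) true = pvGrid p q (fun j => F (p-1-j)) := by
  unfold pv_flip pvGrid
  simpa using pv_reverse_map_range p _

theorem pv_min_rep (p q : Nat) : (List.replicate p q).min?.elim q (min q) = q := by
  induction p with
  | zero => simp
  | succ k ih => rw [List.replicate_succ, List.min?_cons]; simp [ih]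

theorem pv_minLen_grid {p : Nat} (q : Nat) (F : Nat → Nat → String) (hp : 0 < p) :
    pvMinLen (pvGrid p q F) = q := by
  unfold pvMinLen pvGrid
  have : ((List.range p).map (fun j => (List.range q).map (F j))).map List.length
      = List.replicate p q := by
    apply List.ext_getElem (by simp)
    intro i h1 h2
    simp
  rw [this]
  rcases p with _ | p
  · omega
  · rw [List.replicate_succ, List.min?_cons]
    simp [pv_min_rep]

theorem pv_diag_grid {p : Nat} (q : Nat) (F : Nat → Nat → String) (hp : 0 < p) :
    pv_diag (pvGrid p q F) = pvGrid q p (fun j i => F i j) := by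
  rw [pv_diag_eq_grid, pv_minLen_grid q F hp]
  simp only [pvGrid, List.length_map, List.length_range]
  apply pvGrid_congr
  intro j hj i hi
  exact pv_getD_grid hi hj

theorem pv_rot_grid {p : Nat} (q : Nat) (F : Nat → Nat → String) (hp : 0 < p) :
    pv_rot (pvGrid p q F) = pvGrid q p (fun j i => F (p-1-i) j) := by
  unfold pv_rot
  rw [pv_vflip_grid, pv_diag_grid q _ hp]

theorem pv_min?_reverse (l : List Nat) : l.reverse.min? = l.min? := by
  rcases h : l.min? with _ | a
  · rw [List.min?_eq_none_iff] at h; subst h; rfl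
  · rw [List.min?_eq_some_iff] at h ⊢
    simpa using h

theorem pv_minLen_reverse (c : List (List String)) :
    pvMinLen c.reverse = pvMinLen c := by
  unfold pvMinLen
  rw [List.map_reverse]
  congr 1
  exact pv_min?_reverse (c.map List.length)

theorem pv_rot_eq_grid (c : List (List String)) :
    pv_rot c = pvGrid (pvMinLen c) c.length
      (fun j i => (c.getD (c.length-1-i) []).getD j "") := by
  unfold pv_rot pv_flip
  simp only [if_pos]
  rw [pv_diag_eq_grid, pv_minLen_reverse, List.length_reverse]
  apply pvGrid_congr
  intro j _ i hi
  have hrev : c.reverse.getD i [] = c.getD (c.length - 1 - i) [] := by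
    rw [List.getD_eq_getElem _ _ (by simpa using hi),
        List.getD_eq_getElem _ _ (by omega), List.getElem_reverse]
  rw [hrev]

theorem pv_minLen_pos_length_pos {c : List (List String)} (h : 0 < pvMinLen c) :
    0 < c.length := by
  rcases c with _ | ⟨r, t⟩
  · simp [pvMinLen] at h
  · simp

-- A's 4th square-branch board equals B's: diag(rot³ x) = rot(diag x) (any list x)
theorem pv_diag_rot3 (c : List (List String)) :
    pv_diag (pv_rot (pv_rot (pv_rot c))) = pv_rot (pv_diag c) := by
  rcases Nat.eq_zero_or_pos (pvMinLen c) with hM | hM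
  · rw [pv_rot_eq_grid c, hM]
    simp only [pvGrid, List.range_zero, List.map_nil]
    rw [pv_diag_eq_grid c, hM]
    simp [pvGrid, pv_rot, pv_flip, pv_diag, pvMinLen]
  · have hL : 0 < c.length := pv_minLen_pos_length_pos hM
    rw [pv_rot_eq_grid c, pv_rot_grid _ _ hM, pv_rot_grid _ _ hL,
        pv_diag_grid _ _ hM, pv_diag_eq_grid c, pv_rot_grid _ _ hM]
    apply pvGrid_congr
    intro j hj i hi
    congr 2 <;> try omega

-- A's last square-branch board equals B's: rot⁴(diag x) = diag x (any list x)
theorem pv_rot4_diag (c : List (List String)) :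
    pv_rot (pv_rot (pv_rot (pv_rot (pv_diag c)))) = pv_diag c := by
  rcases Nat.eq_zero_or_pos (pvMinLen c) with hM | hM
  · rw [pv_diag_eq_grid c, hM]
    simp [pvGrid, pv_rot, pv_flip, pv_diag, pvMinLen]
  · have hL : 0 < c.length := pv_minLen_pos_length_pos hM
    rw [pv_diag_eq_grid c, pv_rot_grid _ _ hM, pv_rot_grid _ _ hL,
        pv_rot_grid _ _ hM, pv_rot_grid _ _ hL]
    apply pvGrid_congr
    intro j hj i hi
    congr 2 <;> try omega

-- A's last rectangular-branch board equals B's: vflip(hflip(vflip x)) = hflip x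
theorem pv_vhv (c : List (List String)) :
    pv_flip (pv_flip (pv_flip c true) false) true = pv_flip c false := by
  simp [pv_flip]

-- Python's set(xs) builds by inserting in order: ofList of a literal list is the
-- corresponding Set.add chain
theorem pv_ofList2 (x0 x1 : String) :
    PySem.Set.ofList [x0, x1] = PySem.Set.add (PySem.Set.ofList [x0]) x1 := by
  rw [PySem.Set.ofList_eq_foldl, PySem.Set.ofList_eq_foldl]
  simp only [List.foldl_cons, List.foldl_nil]

theorem pv_ofList4 (x0 x1 x2 x3 : String) :
    PySem.Set.ofList [x0, x1, x2, x3] =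
      PySem.Set.add (PySem.Set.add (PySem.Set.add (PySem.Set.ofList [x0]) x1) x2) x3 := by
  rw [PySem.Set.ofList_eq_foldl, PySem.Set.ofList_eq_foldl]
  simp only [List.foldl_cons, List.foldl_nil]

theorem pv_ofList8 (x0 x1 x2 x3 x4 x5 x6 x7 : String) :
    PySem.Set.ofList [x0, x1, x2, x3, x4, x5, x6, x7] =
      PySem.Set.add (PySem.Set.add (PySem.Set.add (PySem.Set.add (PySem.Set.add
        (PySem.Set.add (PySem.Set.add (PySem.Set.ofList [x0]) x1) x2) x3) x4) x5) x6) x7 := by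
  rw [PySem.Set.ofList_eq_foldl, PySem.Set.ofList_eq_foldl]
  simp only [List.foldl_cons, List.foldl_nil]

-- A's square-branch loop, unrolled
theorem pv_foldlA_sq (bc : List (List String)) (s : PySem.Set String) :
    (([pv_rot, pv_rot, pv_rot, pv_diag, pv_rot, pv_rot, pv_rot] :
        List (List (List String) → List (List String))).foldl
      (fun st z => (z st.1, PySem.Set.add st.2 (pv_b2s (z st.1))))
      (bc, s)).2 =
    PySem.Set.add (PySem.Set.add (PySem.Set.add (PySem.Set.add (PySem.Set.add
      (PySem.Set.add (PySem.Set.add s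
        (pv_b2s (pv_rot bc)))
        (pv_b2s (pv_rot (pv_rot bc))))
        (pv_b2s (pv_rot (pv_rot (pv_rot bc)))))
        (pv_b2s (pv_diag (pv_rot (pv_rot (pv_rot bc))))))
        (pv_b2s (pv_rot (pv_diag (pv_rot (pv_rot (pv_rot bc)))))))
        (pv_b2s (pv_rot (pv_rot (pv_diag (pv_rot (pv_rot (pv_rot bc))))))))
        (pv_b2s (pv_rot (pv_rot (pv_rot (pv_diag (pv_rot (pv_rot (pv_rot bc)))))))) := by
  simp only [List.foldl_cons, List.foldl_nil]

-- A's rectangular-branch loop, unrolled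
theorem pv_foldlA_rect (bc : List (List String)) (s : PySem.Set String) :
    (([true, false, true] : List Bool).foldl
      (fun st f => (pv_flip st.1 f, PySem.Set.add st.2 (pv_b2s (pv_flip st.1 f))))
      (bc, s)).2 =
    PySem.Set.add (PySem.Set.add (PySem.Set.add s
      (pv_b2s (pv_flip bc true)))
      (pv_b2s (pv_flip (pv_flip bc true) false)))
      (pv_b2s (pv_flip (pv_flip (pv_flip bc true) false) true)) := by
  simp only [List.foldl_cons, List.foldl_nil]

-- ===== VERDICT (by name: the statement is the Claim_ definition above) =====
theorem board_symmetries_spec : Claim_equal_board_symmetries := by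
  intro board gravity _ _
  unfold Spec_board_symmetries
  unfold board_symmetries board_symmetries_alt
  cases gravity with
  | true =>
    simp only [pv_copy, if_true]
    simp only [List.map_cons, List.map_nil]
    rw [pv_ofList2]
  | false =>
    simp only [pv_copy, Bool.false_eq_true, if_false]
    by_cases h : (board.length : Int) = ((PySem.List.pyGetD board 0 []).length : Int)
    · rw [if_pos h, if_pos h]
      simp only [List.map_cons, List.map_nil]
      rw [pv_foldlA_sq, pv_ofList8, pv_diag_rot3, pv_rot4_diag]
    · rw [if_neg h, if_neg h]
      simp only [List.map_cons, List.map_nil]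
      rw [pv_foldlA_rect, pv_ofList4, pv_vhv]
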